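-- pv_equiv track=rewrite | github.com/maxxentropy/agentforge | src/agentforge/core/harness/minimal_context/token_budget.py | compress_recent_actions
-- ===== SOURCE A (Python) =====
-- CHARS_PER_TOKEN = 4
--
-- def truncate_with_ellipsis(content: str, budget_tokens: int) -> str:
--     """Simple truncation with ellipsis."""
--     max_chars = budget_tokens * CHARS_PER_TOKEN
--     if len(content) <= max_chars:
--         return content
--     return content[:max_chars - 20] + "\n... [truncated]"
--
-- def compress_recent_actions(content: str, budget_tokens: int) -> str:
--     """
--     Compress action list by keeping only most recent.
--
--     Parses YAML-like action entries and keeps the last N that fit.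
--     """
--     max_chars = budget_tokens * CHARS_PER_TOKEN
--     if len(content) <= max_chars:
--         return content
--
--     # Split by action entry markers
--     entries = content.split("- step:")
--     if len(entries) <= 2:
--         return truncate_with_ellipsis(content, budget_tokens)
--
--     # Keep as many recent entries as fit
--     result_entries = []
--     current_chars = 0
--
--     for entry in reversed(entries[1:]):  # Skip first empty split
--         entry_text = "- step:" + entry
--         if current_chars + len(entry_text) > max_chars:
--             break
--         result_entries.insert(0, entry_text)
--         current_chars += len(entry_text)
--
--     if len(result_entries) < len(entries) - 1:
--         omitted = len(entries) - 1 - len(result_entries)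
--         header = f"# [{omitted} earlier actions omitted]\n\n"
--         return header + "\n".join(result_entries)
--
--     return "\n".join(result_entries)
-- ===== SOURCE B (Python) =====
-- CHARS_PER_TOKEN = 4
--
-- def truncate_with_ellipsis(content: str, budget_tokens: int) -> str:
--     max_chars = budget_tokens * CHARS_PER_TOKEN
--     if len(content) <= max_chars:
--         return content
--     return content[:max_chars - 20] + "\n... [truncated]"
--
-- def compress_recent_actions(content: str, budget_tokens: int) -> str:
--     max_chars = budget_tokens * CHARS_PER_TOKEN
--     if len(content) <= max_chars:
--         return content
--
--     entries = content.split("- step:")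
--     if len(entries) <= 2:
--         return truncate_with_ellipsis(content, budget_tokens)
--
--     # Forward pass: drop earliest entries until the remaining total fits.
--     entry_texts = ["- step:" + e for e in entries[1:]]
--     lengths = [len(t) for t in entry_texts]
--     remaining = sum(lengths)
--     start = 0
--     while start < len(entry_texts) and remaining > max_chars:
--         remaining -= lengths[start]
--         start += 1
--
--     kept = "\n".join(entry_texts[start:])
--     if start > 0:
--         return f"# [{start} earlier actions omitted]\n\n" + kept
--     return kept
-- ===== Notes on version B (the rewrite author's own statement) =====
-- stated objective: alternative
-- what changed: Replaces A's backward accumulate-and-break pass with insert(0) by a single forward pass over precomputed entry lengths that drops earliest entries while the remaining total exceeds the budget, then joins the kept slice.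
import Mathlib
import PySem

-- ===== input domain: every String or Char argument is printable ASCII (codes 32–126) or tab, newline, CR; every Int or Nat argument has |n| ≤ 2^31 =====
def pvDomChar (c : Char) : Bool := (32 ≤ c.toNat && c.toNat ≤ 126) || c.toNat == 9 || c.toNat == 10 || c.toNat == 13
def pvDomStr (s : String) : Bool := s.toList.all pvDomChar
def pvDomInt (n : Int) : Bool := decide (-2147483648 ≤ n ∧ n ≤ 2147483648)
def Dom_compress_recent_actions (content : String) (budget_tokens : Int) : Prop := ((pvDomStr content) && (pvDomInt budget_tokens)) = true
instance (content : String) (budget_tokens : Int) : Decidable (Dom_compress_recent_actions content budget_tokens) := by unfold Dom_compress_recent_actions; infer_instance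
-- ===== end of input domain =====

-- B replaces A's backward accumulate-and-break pass by a forward pass that drops
-- earliest entries until the remaining total fits (objective: alternative decomposition).

-- ===== PORT A =====
def CHARS_PER_TOKEN : Int := 4

def truncate_with_ellipsis (content : String) (budget_tokens : Int) : String :=
  let max_chars := budget_tokens * CHARS_PER_TOKEN
  if PySem.Chars.len content.toList ≤ max_chars then content
  else String.ofList (PySem.Chars.slice content.toList none (some (max_chars - 20)) ++ "\n... [truncated]".toList)

-- A's loop 'for entry in reversed(entries[1:])' with break; state (result_entries, current_chars)
def pvALoop (max_chars : Int) : List (List Char) → List (List Char) → Int → List (List Char) × Int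
  | [], acc, cur => (acc, cur)
  | e :: rest, acc, cur =>
    let t := "- step:".toList ++ e
    if max_chars < cur + PySem.Chars.len t then (acc, cur)
    else pvALoop max_chars rest (t :: acc) (cur + PySem.Chars.len t)

def compress_recent_actions (content : String) (budget_tokens : Int) : String :=
  let max_chars := budget_tokens * CHARS_PER_TOKEN
  if PySem.Chars.len content.toList ≤ max_chars then content
  else
    let entries := PySem.Chars.splitOn content.toList "- step:".toList
    if (entries.length : Int) ≤ 2 then truncate_with_ellipsis content budget_tokens
    else
      let result_entries := (pvALoop max_chars (PySem.List.slice entries (some 1)).reverse [] 0).1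
      if (result_entries.length : Int) < (entries.length : Int) - 1 then
        let omitted : Int := (entries.length : Int) - 1 - (result_entries.length : Int)
        String.ofList ("# [".toList ++ PySem.Int.toChars omitted ++ " earlier actions omitted]\n\n".toList
          ++ PySem.Chars.join "\n".toList result_entries)
      else
        String.ofList (PySem.Chars.join "\n".toList result_entries)

-- ===== PORT B =====
-- B's while loop: drop entries from the front while the remaining total exceeds max_chars
def pvBDrop (max_chars : Int) : List Int → Int → Nat
  | [], _ => 0
  | l :: rest, remaining =>
    if max_chars < remaining then pvBDrop max_chars rest (remaining - l) + 1 else 0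

def compress_recent_actions_alt (content : String) (budget_tokens : Int) : String :=
  let max_chars := budget_tokens * CHARS_PER_TOKEN
  if PySem.Chars.len content.toList ≤ max_chars then content
  else
    let entries := PySem.Chars.splitOn content.toList "- step:".toList
    if (entries.length : Int) ≤ 2 then truncate_with_ellipsis content budget_tokens
    else
      let entry_texts := (PySem.List.slice entries (some 1)).map (fun e => "- step:".toList ++ e)
      let lengths := entry_texts.map PySem.Chars.len
      let start := pvBDrop max_chars lengths lengths.sum
      let kept := PySem.Chars.join "\n".toList (entry_texts.drop start)
      if 0 < start then
        String.ofList ("# [".toList ++ PySem.Int.toChars (start : Int) ++ " earlier actions omitted]\n\n".toList ++ kept)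
      else String.ofList kept

-- ===== PRECONDITION & SPEC =====
def Spec_compress_recent_actions (content : String) (budget_tokens : Int) (out : String) : Prop := out = compress_recent_actions_alt content budget_tokens
instance (content : String) (budget_tokens : Int) (out : String) : Decidable (Spec_compress_recent_actions content budget_tokens out) := by unfold Spec_compress_recent_actions; infer_instance

-- ===== CLAIM (what is proved, stated in full; the proofs are below) =====
def Claim_equal_compress_recent_actions : Prop := ∀ (content : String) (budget_tokens : Int), Dom_compress_recent_actions content budget_tokens → Spec_compress_recent_actions content budget_tokens (compress_recent_actions content budget_tokens)

-- ===== LEMMAS AND PROOFS =====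

-- kept texts of A's loop, in processed (reversed) order
def pvPrefKeep (m : Int) : List (List Char) → List (List Char)
  | [] => []
  | t :: rest => if m < PySem.Chars.len t then [] else t :: pvPrefKeep (m - PySem.Chars.len t) rest

-- the maximal suffix whose total length fits
def pvSuffixKeep (m : Int) : List (List Char) → List (List Char)
  | [] => []
  | t :: rest =>
    if ((t :: rest).map PySem.Chars.len).sum ≤ m then t :: rest else pvSuffixKeep m rest

theorem pvSumlen_nonneg (l : List (List Char)) : 0 ≤ (l.map PySem.Chars.len).sum := by
  induction l with
  | nil => simp
  | cons t rest ih =>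
    have ht : (0:Int) ≤ PySem.Chars.len t := by simp [PySem.Chars.len_eq]
    simp only [List.map_cons, List.sum_cons]
    omega

theorem pvALoop_eq (m : Int) (r : List (List Char)) : ∀ acc cur,
    pvALoop m r acc cur
      = ((pvPrefKeep (m - cur) (r.map (fun e => "- step:".toList ++ e))).reverse ++ acc,
         cur + ((pvPrefKeep (m - cur) (r.map (fun e => "- step:".toList ++ e))).map PySem.Chars.len).sum) := by
  induction r with
  | nil => intro acc cur; simp [pvALoop, pvPrefKeep]
  | cons e rest ih =>
    intro acc cur
    simp only [pvALoop, List.map_cons, pvPrefKeep]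
    by_cases h : m < cur + PySem.Chars.len ("- step:".toList ++ e)
    · rw [if_pos h, if_pos (by omega)]
      simp
    · rw [if_neg h, if_neg (by omega), ih]
      have : m - cur - PySem.Chars.len ("- step:".toList ++ e) = m - (cur + PySem.Chars.len ("- step:".toList ++ e)) := by omega
      rw [this]
      simp only [List.reverse_cons, List.append_assoc, List.cons_append, List.nil_append,
        List.map_cons, List.sum_cons]
      rw [Prod.mk.injEq]
      exact ⟨rfl, by omega⟩

theorem pvPrefKeep_all (m : Int) (l : List (List Char)) (h : (l.map PySem.Chars.len).sum ≤ m) :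
    pvPrefKeep m l = l := by
  induction l generalizing m with
  | nil => rfl
  | cons e rest ih =>
    simp only [List.map_cons, List.sum_cons] at h
    have hr := pvSumlen_nonneg rest
    simp only [pvPrefKeep]
    rw [if_neg (by omega), ih _ (by omega)]

theorem pvPrefKeep_drop (m : Int) (t : List Char) (l : List (List Char))
    (h : m < (l.map PySem.Chars.len).sum + PySem.Chars.len t) :
    pvPrefKeep m (l ++ [t]) = pvPrefKeep m l := by
  induction l generalizing m with
  | nil =>
    simp only [List.map_nil, List.sum_nil, Int.zero_add] at h
    simp only [pvPrefKeep, List.nil_append, if_pos h]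
  | cons e rest ih =>
    simp only [List.map_cons, List.sum_cons] at h
    simp only [List.cons_append, pvPrefKeep]
    by_cases he : m < PySem.Chars.len e
    · rw [if_pos he, if_pos he]
    · rw [if_neg he, if_neg he, ih _ (by omega)]

theorem pvPrefKeep_reverse (m : Int) (ts : List (List Char)) :
    (pvPrefKeep m ts.reverse).reverse = pvSuffixKeep m ts := by
  induction ts with
  | nil => rfl
  | cons t rest ih =>
    simp only [List.reverse_cons, pvSuffixKeep]
    by_cases h : ((t :: rest).map PySem.Chars.len).sum ≤ m
    · rw [if_pos h]
      simp only [List.map_cons, List.sum_cons] at h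
      have ht : (0:Int) ≤ PySem.Chars.len t := by simp [PySem.Chars.len_eq]
      have hall : pvPrefKeep m (rest.reverse ++ [t]) = rest.reverse ++ [t] := by
        have : ((rest.reverse ++ [t]).map PySem.Chars.len).sum ≤ m := by
          simp only [List.map_append, List.sum_append, List.map_reverse, List.sum_reverse,
            List.map_cons, List.map_nil, List.sum_cons, List.sum_nil]
          omega
        exact pvPrefKeep_all m _ this
      rw [hall]; simp
    · rw [if_neg h, ← ih]
      simp only [List.map_cons, List.sum_cons] at h
      rw [pvPrefKeep_drop m t rest.reverse (by
        simp only [List.map_reverse, List.sum_reverse]; omega)]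

theorem pvBDrop_eq (m : Int) (ts : List (List Char)) :
    ts.drop (pvBDrop m (ts.map PySem.Chars.len) ((ts.map PySem.Chars.len).sum)) = pvSuffixKeep m ts := by
  induction ts with
  | nil => rfl
  | cons t rest ih =>
    simp only [List.map_cons, pvBDrop, List.sum_cons, pvSuffixKeep]
    by_cases h : m < PySem.Chars.len t + ((rest.map PySem.Chars.len)).sum
    · rw [if_pos h, if_neg (by omega)]
      have : PySem.Chars.len t + (rest.map PySem.Chars.len).sum - PySem.Chars.len t
          = (rest.map PySem.Chars.len).sum := by omega
      rw [List.drop_succ_cons, this, ih]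
    · rw [if_neg h, if_pos (by omega)]
      simp

theorem pvBDrop_le (m : Int) (lens : List Int) (r : Int) : pvBDrop m lens r ≤ lens.length := by
  induction lens generalizing r with
  | nil => simp [pvBDrop]
  | cons l rest ih =>
    simp only [pvBDrop, List.length_cons]
    split
    · have := ih (r - l); omega
    · omega

-- ===== VERDICT (by name: the statement is the Claim_ definition above) =====
theorem compress_recent_actions_spec : Claim_equal_compress_recent_actions := by
  intro content budget_tokens _
  unfold Spec_compress_recent_actions compress_recent_actions compress_recent_actions_alt
  simp only []
  by_cases h1 : PySem.Chars.len content.toList ≤ budget_tokens * CHARS_PER_TOKEN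
  · rw [if_pos h1, if_pos h1]
  · rw [if_neg h1, if_neg h1]
    set entries := PySem.Chars.splitOn content.toList "- step:".toList with hentries
    by_cases h2 : (entries.length : Int) ≤ 2
    · rw [if_pos h2, if_pos h2]
    · rw [if_neg h2, if_neg h2]
      set es := PySem.List.slice entries (some 1) with hes
      set ts := es.map (fun e => "- step:".toList ++ e) with hts
      have hres : (pvALoop (budget_tokens * CHARS_PER_TOKEN) es.reverse [] 0).1
          = ts.drop (pvBDrop (budget_tokens * CHARS_PER_TOKEN) (ts.map PySem.Chars.len) ((ts.map PySem.Chars.len).sum)) := by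
        rw [pvALoop_eq, pvBDrop_eq]
        simp only [List.append_nil, List.map_reverse, Int.sub_zero, ← hts]
        rw [pvPrefKeep_reverse]
      rw [hres]
      set start := pvBDrop (budget_tokens * CHARS_PER_TOKEN) (ts.map PySem.Chars.len) ((ts.map PySem.Chars.len).sum) with hstart
      have hlen_ts : ts.length = es.length := by simp [hts]
      have hlen_es : es.length = entries.length - 1 := by
        rw [hes, PySem.List.slice_from_one, List.length_tail]
      have hne : 2 < (entries.length : Int) := by omega
      have hpos : 3 ≤ entries.length := by exact_mod_cast hne
      have hstart_le : start ≤ ts.length := by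
        have := pvBDrop_le (budget_tokens * CHARS_PER_TOKEN) (ts.map PySem.Chars.len) ((ts.map PySem.Chars.len).sum)
        simpa using this
      have hdlen : (ts.drop start).length = ts.length - start := List.length_drop
      by_cases h3 : 0 < start
      · rw [if_pos (by rw [hdlen]; omega), if_pos h3]
        have : ((entries.length : Int) - 1 - ((ts.drop start).length : Int)) = (start : Int) := by
          rw [hdlen]; omega
        rw [this]
      · rw [if_neg (by rw [hdlen]; omega), if_neg h3]
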